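-- pv_equiv track=rewrite | github.com/t4n4k49n/qual-law-guideline | src/qai_xml2ir/egov_parser.py | _flatten_grid_to_rows
-- ===== SOURCE A (Python) =====
-- from typing import Any, Dict, List, Optional, Tuple
--
-- def _flatten_grid_to_rows(
--     anchors: Dict[str, Dict[str, Any]],
--     cover: Dict[Tuple[int, int], str],
--     nrows: int,
--     ncols: int,
-- ) -> List[List[str]]:
--     rows: List[List[str]] = []
--     for r in range(nrows):
--         row_cells: List[str] = []
--         for c in range(ncols):
--             anchor_id = cover.get((r, c))
--             text = ""
--             if anchor_id:
--                 text = str(anchors[anchor_id]["text"])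
--             row_cells.append(text)
--         rows.append(row_cells)
--     return rows
-- ===== SOURCE B (Python) =====
-- from typing import Any, Dict, List, Tuple
--
--
-- def _flatten_grid_to_rows(
--     anchors: Dict[str, Dict[str, Any]],
--     cover: Dict[Tuple[int, int], str],
--     nrows: int,
--     ncols: int,
-- ) -> List[List[str]]:
--     # Scatter: pre-fill a dense nrows x ncols grid with "" and write each
--     # in-bounds covered cell once, instead of looking every cell up in cover.
--     rows: List[List[str]] = [[""] * ncols for _ in range(nrows)]
--     for (r, c), anchor_id in cover.items():
--         if 0 <= r < nrows and 0 <= c < ncols and anchor_id: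
--             rows[r][c] = str(anchors[anchor_id]["text"])
--     return rows
-- ===== Notes on version B (the rewrite author's own statement) =====
-- stated objective: alternative
-- what changed: B pre-fills a dense nrows x ncols grid of empty strings and scatters the cover entries into it in one pass over cover, instead of A's gather that queries the cover dict once per cell of the grid.
import Mathlib
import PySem

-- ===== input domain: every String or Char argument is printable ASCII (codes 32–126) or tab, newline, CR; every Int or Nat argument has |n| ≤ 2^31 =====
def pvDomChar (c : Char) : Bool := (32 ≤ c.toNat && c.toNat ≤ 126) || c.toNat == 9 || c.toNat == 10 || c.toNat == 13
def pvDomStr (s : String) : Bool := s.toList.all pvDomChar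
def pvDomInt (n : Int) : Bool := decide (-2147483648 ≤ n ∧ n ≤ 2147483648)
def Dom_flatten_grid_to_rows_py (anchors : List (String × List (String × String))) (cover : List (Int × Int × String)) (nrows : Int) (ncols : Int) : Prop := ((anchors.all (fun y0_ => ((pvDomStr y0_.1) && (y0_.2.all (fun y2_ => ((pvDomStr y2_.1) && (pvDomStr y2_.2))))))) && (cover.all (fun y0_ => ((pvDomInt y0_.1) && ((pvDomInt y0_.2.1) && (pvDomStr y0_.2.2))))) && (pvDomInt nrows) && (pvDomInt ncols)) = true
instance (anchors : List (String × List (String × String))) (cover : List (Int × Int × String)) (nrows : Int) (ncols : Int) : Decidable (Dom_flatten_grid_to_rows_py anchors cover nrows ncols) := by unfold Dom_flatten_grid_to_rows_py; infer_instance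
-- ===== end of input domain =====

-- B scatters the sparse cover into a dense pre-filled grid (one pass over cover)
-- instead of A's per-cell gather; equal results proved on Pre_ (alternative decomposition, no speed claim).

-- anchors[anchor_id]["text"] with dict first-match lookup; returns "" on the
-- KeyError cases, which Pre_ excludes (both Pythons raise KeyError exactly there).
def pvAnchorText (anchors : List (String × List (String × String))) (anchor_id : String) : String :=
  match anchors.find? (fun p => p.1 == anchor_id) with
  | some p =>
    match p.2.find? (fun q => q.1 == "text") with
    | some q => q.2
    | none => ""
  | none => ""

-- ===== PORT A =====
def flatten_grid_to_rows_py (anchors : List (String × List (String × String))) (cover : List (Int × Int × String)) (nrows : Int) (ncols : Int) : List (List String) :=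
  (PySem.List.pyRange 0 nrows 1).foldl (fun rows r =>
    rows ++ [(PySem.List.pyRange 0 ncols 1).foldl (fun row_cells c =>
      row_cells ++ [
        -- anchor_id = cover.get((r, c)); text = "" ; if anchor_id: text = str(anchors[anchor_id]["text"])
        match (cover.find? (fun t => t.1 == r && t.2.1 == c)).map (fun t => t.2.2) with
        | some anchor_id => if anchor_id ≠ "" then pvAnchorText anchors anchor_id else ""
        | none => ""]) []]) []

-- ===== PORT B =====
-- loop body of B: write one in-bounds, truthy cover entry into the grid
def pvStep (anchors : List (String × List (String × String))) (nrows : Int) (ncols : Int) (rows : List (List String)) (t : Int × Int × String) : List (List String) :=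
  if 0 ≤ t.1 ∧ t.1 < nrows ∧ 0 ≤ t.2.1 ∧ t.2.1 < ncols ∧ t.2.2 ≠ "" then
    rows.modify t.1.toNat (fun row => row.set t.2.1.toNat (pvAnchorText anchors t.2.2))
  else rows

def flatten_grid_to_rows_py_alt (anchors : List (String × List (String × String))) (cover : List (Int × Int × String)) (nrows : Int) (ncols : Int) : List (List String) :=
  cover.foldl (pvStep anchors nrows ncols)
    (List.replicate nrows.toNat (List.replicate ncols.toNat ""))

-- ===== PRECONDITION & SPEC =====
-- Pre_ excludes (a) cover association lists with duplicate (r, c) keys, which a Python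
-- dict cannot present (a dict has unique keys), and (b) inputs where an in-bounds,
-- non-empty anchor id is missing from anchors or its dict lacks "text": there BOTH
-- Pythons raise KeyError.
def Pre_flatten_grid_to_rows_py (anchors : List (String × List (String × String))) (cover : List (Int × Int × String)) (nrows : Int) (ncols : Int) : Prop :=
  (cover.map (fun t => (t.1, t.2.1))).Nodup ∧
  ∀ t ∈ cover, (0 ≤ t.1 ∧ t.1 < nrows ∧ 0 ≤ t.2.1 ∧ t.2.1 < ncols ∧ t.2.2 ≠ "") →
    ((anchors.find? (fun p => p.1 == t.2.2)).bind (fun p => p.2.find? (fun q => q.1 == "text"))).isSome = true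
instance (anchors : List (String × List (String × String))) (cover : List (Int × Int × String)) (nrows : Int) (ncols : Int) : Decidable (Pre_flatten_grid_to_rows_py anchors cover nrows ncols) := by unfold Pre_flatten_grid_to_rows_py; infer_instance

def pvWitness_flatten_grid_to_rows_py : (List (String × List (String × String))) × (List (Int × Int × String)) × Int × Int :=
  ([("a", [("text", "Art. 1")])], [((0 : Int), (0 : Int), "a"), ((1 : Int), (0 : Int), "")], 2, 1)

def Spec_flatten_grid_to_rows_py (anchors : List (String × List (String × String))) (cover : List (Int × Int × String)) (nrows : Int) (ncols : Int) (out : List (List String)) : Prop := out = flatten_grid_to_rows_py_alt anchors cover nrows ncols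
instance (anchors : List (String × List (String × String))) (cover : List (Int × Int × String)) (nrows : Int) (ncols : Int) (out : List (List String)) : Decidable (Spec_flatten_grid_to_rows_py anchors cover nrows ncols out) := by unfold Spec_flatten_grid_to_rows_py; infer_instance

-- ===== CLAIM (what is proved, stated in full; the proofs are below) =====
def Claim_equal_flatten_grid_to_rows_py : Prop := ∀ (anchors : List (String × List (String × String))) (cover : List (Int × Int × String)) (nrows : Int) (ncols : Int), Dom_flatten_grid_to_rows_py anchors cover nrows ncols → Pre_flatten_grid_to_rows_py anchors cover nrows ncols → Spec_flatten_grid_to_rows_py anchors cover nrows ncols (flatten_grid_to_rows_py anchors cover nrows ncols)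

-- ===== LEMMAS AND PROOFS =====

-- the value A computes for one cell
def pvCell (anchors : List (String × List (String × String))) (cover : List (Int × Int × String)) (r c : Int) : String :=
  match (cover.find? (fun t => t.1 == r && t.2.1 == c)).map (fun t => t.2.2) with
  | some anchor_id => if anchor_id ≠ "" then pvAnchorText anchors anchor_id else ""
  | none => ""

lemma portA_eq_map (anchors : List (String × List (String × String))) (cover : List (Int × Int × String)) (nrows ncols : Int) :
    flatten_grid_to_rows_py anchors cover nrows ncols =
      (List.range nrows.toNat).map (fun r : Nat => (List.range ncols.toNat).map (fun c : Nat => pvCell anchors cover (r : Int) (c : Int))) := by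
  unfold flatten_grid_to_rows_py
  simp only [PySem.List.foldl_append_singleton_eq_map, List.nil_append]
  rw [PySem.List.pyRange_one, PySem.List.pyRange_one]
  simp only [sub_zero, List.map_map]
  refine List.map_congr_left ?_
  intro r _
  refine List.map_congr_left ?_
  intro c _
  simp [pvCell]

lemma foldB_length (anchors : List (String × List (String × String))) (nrows ncols : Int) :
    ∀ (l : List (Int × Int × String)) (g : List (List String)),
      (l.foldl (pvStep anchors nrows ncols) g).length = g.length := by
  intro l
  induction l with
  | nil => intro g; rfl
  | cons t rest ih =>
    intro g
    simp only [List.foldl_cons, ih, pvStep]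
    split_ifs <;> simp [List.length_modify]

lemma foldB_shape (anchors : List (String × List (String × String))) (nrows ncols : Int) :
    ∀ (l : List (Int × Int × String)) (g : List (List String)) (j : Nat),
      ((l.foldl (pvStep anchors nrows ncols) g)[j]?).map List.length = (g[j]?).map List.length := by
  intro l
  induction l with
  | nil => intro g j; rfl
  | cons t rest ih =>
    intro g j
    simp only [List.foldl_cons]
    rw [ih]
    by_cases h : (0 ≤ t.1 ∧ t.1 < nrows ∧ 0 ≤ t.2.1 ∧ t.2.1 < ncols ∧ t.2.2 ≠ "")
    · simp only [pvStep, if_pos h, List.getElem?_modify]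
      cases g[j]? with
      | none => rfl
      | some row => simp only [Option.map_some]; split <;> simp [List.length_set]
    · simp [pvStep, if_neg h]

lemma foldB_cell (anchors : List (String × List (String × String))) (nrows ncols : Int) :
    ∀ (l : List (Int × Int × String)) (g : List (List String)),
      (l.map (fun t => (t.1, t.2.1))).Nodup →
      g.length = nrows.toNat →
      ∀ (r c : Nat), r < nrows.toNat → c < ncols.toNat →
      (∀ j (h : j < g.length), (g[j]).length = ncols.toNat) →
      (((l.foldl (pvStep anchors nrows ncols) g)[r]?.getD [])[c]?.getD "") =
        (match (l.find? (fun t => t.1 == (r : Int) && t.2.1 == (c : Int))).map (fun t => t.2.2) with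
         | some anchor_id => if anchor_id ≠ "" then pvAnchorText anchors anchor_id else ((g[r]?.getD [])[c]?.getD "")
         | none => ((g[r]?.getD [])[c]?.getD "")) := by
  intro l
  induction l with
  | nil => intro g _ _ r c _ _ _; simp
  | cons t rest ih =>
    intro g hnd hg r c hr hc hrows
    have hndr : (rest.map (fun t => (t.1, t.2.1))).Nodup := by
      simpa using hnd.of_cons
    by_cases hkey : t.1 = (r : Int) ∧ t.2.1 = (c : Int)
    · -- head entry is the cell (r, c); rest contains no entry for it
      have hrest : rest.find? (fun t => t.1 == (r : Int) && t.2.1 == (c : Int)) = none := by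
        rw [List.find?_eq_none]
        intro x hx hpx
        have hxk : (x.1, x.2.1) = (t.1, t.2.1) := by
          simp only [beq_iff_eq, Bool.and_eq_true] at hpx
          simp [hpx.1, hpx.2, hkey.1, hkey.2]
        have : (t.1, t.2.1) ∈ rest.map (fun t => (t.1, t.2.1)) := by
          exact hxk ▸ List.mem_map_of_mem hx
        simp only [List.map_cons, List.nodup_cons] at hnd
        exact hnd.1 this
      have hfind : List.find? (fun t => t.1 == (r : Int) && t.2.1 == (c : Int)) (t :: rest) = some t := by
        simp [hkey.1, hkey.2]
      have hbound : 0 ≤ t.1 ∧ t.1 < nrows ∧ 0 ≤ t.2.1 ∧ t.2.1 < ncols := by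
        refine ⟨hkey.1 ▸ Int.natCast_nonneg r, hkey.1 ▸ ?_, hkey.2 ▸ Int.natCast_nonneg c, hkey.2 ▸ ?_⟩ <;> omega
      by_cases hid : t.2.2 = ""
      · -- empty anchor id: B skips, A writes ""
        have hstep : pvStep anchors nrows ncols g t = g := by
          simp [pvStep, hid]
        rw [List.foldl_cons, hstep, ih g hndr hg r c hr hc hrows, hrest, hfind]
        simp [hid]
      · -- B writes the cell; no later entry touches it
        have hcondT : (0 ≤ t.1 ∧ t.1 < nrows ∧ 0 ≤ t.2.1 ∧ t.2.1 < ncols ∧ t.2.2 ≠ "") :=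
          ⟨hbound.1, hbound.2.1, hbound.2.2.1, hbound.2.2.2, hid⟩
        have hstep : pvStep anchors nrows ncols g t =
            g.modify r (fun row => row.set c (pvAnchorText anchors t.2.2)) := by
          unfold pvStep
          rw [if_pos hcondT, hkey.1, hkey.2]
          simp
        have hg' : (g.modify r (fun row => row.set c (pvAnchorText anchors t.2.2))).length = nrows.toNat := by
          simp [List.length_modify, hg]
        have hrows' : ∀ j (h : j < (g.modify r (fun row => row.set c (pvAnchorText anchors t.2.2))).length),
            ((g.modify r (fun row => row.set c (pvAnchorText anchors t.2.2)))[j]).length = ncols.toNat := by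
          intro j hj
          rw [List.getElem_modify]
          split_ifs <;> simp [List.length_set, hrows j (by simpa [List.length_modify] using hj)]
        rw [List.foldl_cons, hstep, ih _ hndr hg' r c hr hc hrows', hrest, hfind]
        have hrlen : r < g.length := by omega
        have hclen : c < (g[r]).length := by rw [hrows r hrlen]; exact hc
        simp [List.getElem?_eq_getElem hrlen, hclen, hid]
    · -- head entry is some other cell: the grid at (r, c) is untouched
      have hfind : List.find? (fun t => t.1 == (r : Int) && t.2.1 == (c : Int)) (t :: rest) =
          rest.find? (fun t => t.1 == (r : Int) && t.2.1 == (c : Int)) := by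
        rw [List.find?_cons]
        have : (t.1 == (r : Int) && t.2.1 == (c : Int)) = false := by
          by_contra h
          simp only [Bool.not_eq_false, Bool.and_eq_true, beq_iff_eq] at h
          exact hkey ⟨h.1, h.2⟩
        rw [this]
      by_cases hcond : (0 ≤ t.1 ∧ t.1 < nrows ∧ 0 ≤ t.2.1 ∧ t.2.1 < ncols ∧ t.2.2 ≠ "")
      · have hstep : pvStep anchors nrows ncols g t =
            g.modify t.1.toNat (fun row => row.set t.2.1.toNat (pvAnchorText anchors t.2.2)) := by
          simp [pvStep, hcond]
        have hg' : (g.modify t.1.toNat (fun row => row.set t.2.1.toNat (pvAnchorText anchors t.2.2))).length = nrows.toNat := by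
          simp [List.length_modify, hg]
        have hrows' : ∀ j (h : j < (g.modify t.1.toNat (fun row => row.set t.2.1.toNat (pvAnchorText anchors t.2.2))).length),
            ((g.modify t.1.toNat (fun row => row.set t.2.1.toNat (pvAnchorText anchors t.2.2)))[j]).length = ncols.toNat := by
          intro j hj
          rw [List.getElem_modify]
          split_ifs <;> simp [List.length_set, hrows j (by simpa [List.length_modify] using hj)]
        have huntouched : (((g.modify t.1.toNat (fun row => row.set t.2.1.toNat (pvAnchorText anchors t.2.2)))[r]?.getD [])[c]?.getD "") =
            ((g[r]?.getD [])[c]?.getD "") := by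
          rw [List.getElem?_modify]
          by_cases hrow : t.1.toNat = r
          · -- same row, different column
            have hcol : t.2.1.toNat ≠ c := by
              intro hcc
              exact hkey ⟨by omega, by omega⟩
            cases hgr : g[r]? with
            | none => simp
            | some row => simp [hrow, hcol]
          · simp [hrow]
        rw [List.foldl_cons, hstep, ih _ hndr hg' r c hr hc hrows', hfind, huntouched]
      · have hstep : pvStep anchors nrows ncols g t = g := by
          simp only [pvStep, if_neg hcond]
        rw [List.foldl_cons, hstep, ih g hndr hg r c hr hc hrows, hfind]

-- ===== VERDICT (by name: the statement is the Claim_ definition above) =====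
theorem flatten_grid_to_rows_py_spec : Claim_equal_flatten_grid_to_rows_py := by
  intro anchors cover nrows ncols _hdom hpre
  unfold Spec_flatten_grid_to_rows_py
  rw [portA_eq_map]
  unfold flatten_grid_to_rows_py_alt
  have hg : (List.replicate nrows.toNat (List.replicate ncols.toNat ("" : String))).length = nrows.toNat := by
    simp
  apply List.ext_getElem
  · rw [foldB_length]; simp
  · intro r h1 h2
    have hr : r < nrows.toNat := by simpa using h1
    have hshape := foldB_shape anchors nrows ncols cover (List.replicate nrows.toNat (List.replicate ncols.toNat "")) r
    have hinit : (List.replicate nrows.toNat (List.replicate ncols.toNat ("" : String)))[r]? = some (List.replicate ncols.toNat "") := by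
      simp [hr]
    rw [hinit] at hshape
    have hrowlen : ((cover.foldl (pvStep anchors nrows ncols) (List.replicate nrows.toNat (List.replicate ncols.toNat "")))[r]).length = ncols.toNat := by
      have := hshape
      rw [List.getElem?_eq_getElem h2] at this
      simpa using this
    apply List.ext_getElem
    · simp [hrowlen]
    · intro c hc1 hc2
      have hc : c < ncols.toNat := by simpa using hc1
      have hcell := foldB_cell anchors nrows ncols cover
        (List.replicate nrows.toNat (List.replicate ncols.toNat "")) hpre.1 hg r c hr hc
        (by intro j hj; simp at hj ⊢)
      have hinit_cell : (((List.replicate nrows.toNat (List.replicate ncols.toNat ("" : String)))[r]?.getD [])[c]?.getD "") = "" := by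
        rw [hinit]; simp [hc]
      rw [hinit_cell] at hcell
      have hB : (((cover.foldl (pvStep anchors nrows ncols) (List.replicate nrows.toNat (List.replicate ncols.toNat "")))[r]?.getD [])[c]?.getD "")
          = ((cover.foldl (pvStep anchors nrows ncols) (List.replicate nrows.toNat (List.replicate ncols.toNat "")))[r])[c]'(by rw [hrowlen]; exact hc) := by
        rw [List.getElem?_eq_getElem h2]
        simp only [Option.getD_some]
        rw [List.getElem?_eq_getElem (by rw [hrowlen]; exact hc)]
        rfl
      rw [hB] at hcell
      simp only [List.getElem_map, List.getElem_range]
      rw [hcell]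
      rfl
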